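-- pv_equiv track=rewrite | github.com/0nhc/m2sim | main.py | delete_dummy_from_dict
-- ===== SOURCE A (Python) =====
-- def delete_dummy_from_dict(input_dict):
--     keys_to_delete = []
--     for key in input_dict.keys():
--         if 'dummy' in key:
--             keys_to_delete.append(key)
--     if len(keys_to_delete) > 0:
--         for key in keys_to_delete:
--             del input_dict[key]
--     return input_dict
-- ===== SOURCE B (Python) =====
-- def delete_dummy_from_dict(input_dict):
--     # fixpoint loop: repeatedly find one offending key and delete it, until none remains
--     while True:
--         victim = next((k for k in input_dict if 'dummy' in k), None)
--         if victim is None: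
--             return input_dict
--         del input_dict[victim]
-- ===== Notes on version B (the rewrite author's own statement) =====
-- stated objective: alternative
-- what changed: Replaces A's two-phase collect-all-keys-then-delete-each with a fixpoint loop that repeatedly scans for a single offending key and deletes it until no key contains 'dummy', preserving in-place mutation and identity.
import Mathlib
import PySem

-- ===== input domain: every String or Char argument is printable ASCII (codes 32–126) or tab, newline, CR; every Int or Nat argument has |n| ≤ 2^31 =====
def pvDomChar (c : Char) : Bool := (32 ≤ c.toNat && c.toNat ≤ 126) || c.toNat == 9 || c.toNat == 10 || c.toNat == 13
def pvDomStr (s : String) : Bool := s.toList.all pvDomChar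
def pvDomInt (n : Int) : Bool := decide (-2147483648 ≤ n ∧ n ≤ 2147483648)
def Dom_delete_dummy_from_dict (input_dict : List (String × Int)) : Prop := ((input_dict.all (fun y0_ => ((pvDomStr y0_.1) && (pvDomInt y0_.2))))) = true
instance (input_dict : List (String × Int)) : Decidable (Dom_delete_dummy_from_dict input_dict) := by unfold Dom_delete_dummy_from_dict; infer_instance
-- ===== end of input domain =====

-- B replaces A's two-phase collect-keys-then-delete-each by a fixpoint loop that repeatedly finds one
-- offending key and deletes it until none contains "dummy"; both Pythons mutate the argument in place
-- and return it, and the equivalence proved here is about the returned value.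

-- ===== PORT A =====
-- del input_dict[key]: removes the entry at that key — first match in the association list
def pvDelKey (d : List (String × Int)) (k : String) : List (String × Int) :=
  match d with
  | [] => []
  | p :: rest => if p.1 == k then rest else p :: pvDelKey rest k

def delete_dummy_from_dict (input_dict : List (String × Int)) : List (String × Int) :=
  let keys_to_delete :=
    (input_dict.map Prod.fst).foldl
      (fun acc key => if PySem.Str.isIn "dummy" key then acc ++ [key] else acc) []
  if keys_to_delete.length > 0 then
    keys_to_delete.foldl (fun d key => pvDelKey d key) input_dict
  else input_dict

-- ===== PORT B =====
-- termination helper: deleting a present key strictly shrinks the list (cited by decreasing_by)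
theorem pvDelKey_length_lt (d : List (String × Int)) (k : String) (h : k ∈ d.map Prod.fst) :
    (pvDelKey d k).length < d.length := by
  induction d with
  | nil => simp at h
  | cons p rest ih =>
      simp only [pvDelKey]
      by_cases hp : p.1 == k
      · rw [if_pos hp]; simp
      · rw [if_neg hp]
        have : k ∈ rest.map Prod.fst := by
          rcases (by simpa using h) with h1 | h2
          · exact absurd (by simp [h1]) hp
          · simpa using h2
        simpa using ih this

-- while True: victim = next((k for k in input_dict if 'dummy' in k), None);
--             if victim is None: return input_dict; del input_dict[victim]
def delete_dummy_from_dict_alt (input_dict : List (String × Int)) : List (String × Int) :=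
  match hfind : input_dict.find? (fun p => PySem.Str.isIn "dummy" p.1) with
  | none => input_dict
  | some p => delete_dummy_from_dict_alt (pvDelKey input_dict p.1)
termination_by input_dict.length
decreasing_by
  exact pvDelKey_length_lt _ _ (List.mem_map_of_mem (List.mem_of_find?_eq_some hfind))

-- ===== PRECONDITION & SPEC =====
def Spec_delete_dummy_from_dict (input_dict : List (String × Int)) (out : List (String × Int)) : Prop := out = delete_dummy_from_dict_alt input_dict
instance (input_dict : List (String × Int)) (out : List (String × Int)) : Decidable (Spec_delete_dummy_from_dict input_dict out) := by unfold Spec_delete_dummy_from_dict; infer_instance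

-- ===== CLAIM (what is proved, stated in full; the proofs are below) =====
def Claim_equal_delete_dummy_from_dict : Prop := ∀ (input_dict : List (String × Int)), Dom_delete_dummy_from_dict input_dict → Spec_delete_dummy_from_dict input_dict (delete_dummy_from_dict input_dict)

-- ===== LEMMAS AND PROOFS =====

-- deleting a key absent from the head leaves the head in place
theorem foldl_pvDelKey_cons (x : String × Int) (l : List (String × Int)) (ks : List String)
    (h : ∀ k ∈ ks, k ≠ x.1) :
    ks.foldl (fun d key => pvDelKey d key) (x :: l)
      = x :: ks.foldl (fun d key => pvDelKey d key) l := by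
  induction ks generalizing l with
  | nil => rfl
  | cons k ks ih =>
      have hk : k ≠ x.1 := h k (by simp)
      simp only [List.foldl_cons, pvDelKey]
      rw [if_neg (by simpa using fun he => hk (by simpa using he.symm))]
      exact ih (pvDelKey l k) (fun k' hk' => h k' (by simp [hk']))

-- deleting, in order, every key of the list that satisfies p leaves exactly the entries whose key does not
theorem foldl_pvDelKey_filter (p : String → Bool) (l : List (String × Int)) :
    ((l.map Prod.fst).filter p).foldl (fun d key => pvDelKey d key) l
      = l.filter (fun q => !(p q.1)) := by
  induction l with
  | nil => rfl
  | cons x rest ih =>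
      by_cases hp : p x.1
      · simp only [List.map_cons, List.filter_cons, hp, if_pos, List.foldl_cons, pvDelKey,
          BEq.rfl]
        simpa using ih
      · have hne : ∀ k ∈ (rest.map Prod.fst).filter p, k ≠ x.1 := by
          intro k hk he
          have := List.of_mem_filter hk
          rw [he] at this
          exact hp this
        simp only [List.map_cons, List.filter_cons, hp]
        rw [if_neg (by simp), foldl_pvDelKey_cons x rest _ hne, ih]
        simp

-- deleting one entry whose key satisfies p does not change the filter of the survivors
theorem filter_pvDelKey (p : String → Bool) (l : List (String × Int)) (k : String)
    (hk : p k = true) :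
    (pvDelKey l k).filter (fun q => !(p q.1)) = l.filter (fun q => !(p q.1)) := by
  induction l with
  | nil => rfl
  | cons x rest ih =>
      simp only [pvDelKey]
      by_cases hx : x.1 == k
      · rw [if_pos hx]
        have : p x.1 = true := by rw [(by simpa using hx : x.1 = k)]; exact hk
        simp [this]
      · rw [if_neg hx]
        simp only [List.filter_cons]
        by_cases hkeep : (!(p x.1)) = true <;> simp [hkeep, ih]

-- B's fixpoint loop computes the filter of the surviving entries
theorem alt_eq_filter (l : List (String × Int)) :
    delete_dummy_from_dict_alt l
      = l.filter (fun q => !(PySem.Str.isIn "dummy" q.1)) := by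
  fun_induction delete_dummy_from_dict_alt l with
  | case1 l hfind =>
      have hall := List.find?_eq_none.mp hfind
      exact (List.filter_eq_self.mpr (by intro a ha; simpa using hall a ha)).symm
  | case2 l p hfind ih =>
      have hp : PySem.Str.isIn "dummy" p.1 = true := by simpa using List.find?_some hfind
      rw [ih, filter_pvDelKey _ _ _ hp]

-- ===== VERDICT (by name: the statement is the Claim_ definition above) =====
theorem delete_dummy_from_dict_spec : Claim_equal_delete_dummy_from_dict := by
  intro l _
  unfold Spec_delete_dummy_from_dict delete_dummy_from_dict
  rw [alt_eq_filter, PySem.List.foldl_append_if]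
  simp only [List.nil_append, List.map_id']
  split_ifs with h
  · exact foldl_pvDelKey_filter _ l
  · have hnil : (l.map Prod.fst).filter (fun key => PySem.Str.isIn "dummy" key) = [] := by
      cases he : (l.map Prod.fst).filter (fun key => PySem.Str.isIn "dummy" key) with
      | nil => rfl
      | cons a as => exact absurd (by simp [he]) h
    have := foldl_pvDelKey_filter (fun key => PySem.Str.isIn "dummy" key) l
    rw [hnil] at this
    simpa [List.map_id'] using this
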